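-- pv_equiv track=rewrite | github.com/ThePracticalHow/TrueHumanAtlas | staff/scan/panel.py | _encode_kmer
-- ===== SOURCE A (Python) =====
-- BASE_ENCODE = {'A': 0, 'C': 1, 'G': 2, 'T': 3,
--                'a': 0, 'c': 1, 'g': 2, 't': 3}
--
-- def _encode_kmer(seq):
--     """Encode a k-mer as a 64-bit integer. Returns None if ambiguous bases."""
--     val = 0
--     for ch in seq:
--         b = BASE_ENCODE.get(ch)
--         if b is None:
--             return None
--         val = (val << 2) | b
--     return val
-- ===== SOURCE B (Python) =====
-- BASE_ENCODE = {'A': 0, 'C': 1, 'G': 2, 'T': 3,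
--                'a': 0, 'c': 1, 'g': 2, 't': 3}
--
-- def _encode_kmer(seq):
--     """Encode a k-mer as a 64-bit integer. Returns None if ambiguous bases."""
--     digits = [BASE_ENCODE[ch] for ch in seq if ch in BASE_ENCODE]
--     k = len(digits)
--     if k != len(seq):
--         return None
--     return sum(d * 4 ** (k - 1 - i) for i, d in enumerate(digits))
-- ===== Notes on version B (the rewrite author's own statement) =====
-- stated objective: alternative
-- what changed: A's single shift-and-or accumulating fold with an early return is replaced by a validate-then-convert pair of passes: a comprehension collects the digits of all recognised bases (a length mismatch signals an ambiguous base), then the value is computed as a positional base-4 sum of digit times 4**(k-1-i) instead of Horner-style shift accumulation.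
import Mathlib
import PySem

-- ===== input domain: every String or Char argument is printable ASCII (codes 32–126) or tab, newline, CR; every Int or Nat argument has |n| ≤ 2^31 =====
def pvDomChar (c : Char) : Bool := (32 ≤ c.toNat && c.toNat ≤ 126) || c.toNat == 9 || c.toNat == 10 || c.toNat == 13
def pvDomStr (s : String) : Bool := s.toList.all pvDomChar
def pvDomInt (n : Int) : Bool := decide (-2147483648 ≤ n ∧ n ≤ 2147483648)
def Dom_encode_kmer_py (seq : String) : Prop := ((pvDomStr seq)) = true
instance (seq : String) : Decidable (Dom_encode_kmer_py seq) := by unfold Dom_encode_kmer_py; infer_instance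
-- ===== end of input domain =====

-- B replaces A's shift-and-or accumulating fold by a validate-then-convert pair of passes ending
-- in a positional base-4 sum (alternative decomposition, same O(n) cost).

-- ===== PORT A =====
-- the module constant BASE_ENCODE (shared by both Pythons)
def pvBASE_ENCODE : PySem.Dict Char Int :=
  PySem.Dict.ofList [('A', 0), ('C', 1), ('G', 2), ('T', 3),
                     ('a', 0), ('c', 1), ('g', 2), ('t', 3)]

-- the 'for ch in seq' loop of A, carrying val; early return None on an ambiguous base
def pvEncLoopA : List Char → Int → Option Int
  | [], val => some val
  | ch :: rest, val =>
    match pvBASE_ENCODE.get? ch with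
    | none => none
    | some b => pvEncLoopA rest (PySem.Int.bor (val <<< (2 : Nat)) b)

def encode_kmer_py (seq : String) : Option Int :=
  pvEncLoopA seq.toList 0

-- ===== PORT B =====
def encode_kmer_py_alt (seq : String) : Option Int :=
  -- digits = [BASE_ENCODE[ch] for ch in seq if ch in BASE_ENCODE]
  let digits := seq.toList.filterMap (fun ch => pvBASE_ENCODE.get? ch)
  let k := digits.length
  if k ≠ seq.toList.length then none
  else
    -- sum(d * 4 ** (k - 1 - i) for i, d in enumerate(digits))
    some ((PySem.List.enumerate digits).foldl
      (fun acc p => acc + p.2 * 4 ^ (k - 1 - p.1.toNat)) 0)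

-- ===== PRECONDITION & SPEC =====
def Spec_encode_kmer_py (seq : String) (out : Option Int) : Prop := out = encode_kmer_py_alt seq
instance (seq : String) (out : Option Int) : Decidable (Spec_encode_kmer_py seq out) := by unfold Spec_encode_kmer_py; infer_instance

-- ===== CLAIM (what is proved, stated in full; the proofs are below) =====
def Claim_equal_encode_kmer_py : Prop := ∀ (seq : String), Dom_encode_kmer_py seq → Spec_encode_kmer_py seq (encode_kmer_py seq)

-- ===== LEMMAS AND PROOFS =====

-- digits of the sequence, as an Option list (none iff some base is ambiguous)
def pvDigits? : List Char → Option (List Int)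
  | [] => some []
  | c :: cs =>
    match pvBASE_ENCODE.get? c with
    | none => none
    | some b => (pvDigits? cs).map (b :: ·)

-- Horner value of a digit list
def pvHorner (a : Int) (ds : List Int) : Int := ds.foldl (fun x b => 4 * x + b) a

theorem pvBASE_range (c : Char) (b : Int) (h : pvBASE_ENCODE.get? c = some b) :
    0 ≤ b ∧ b < 4 := by
  have e : pvBASE_ENCODE = PySem.Dict.mk [('A', 0), ('C', 1), ('G', 2), ('T', 3),
      ('a', 0), ('c', 1), ('g', 2), ('t', 3)] := by decide
  rw [e] at h
  simp only [PySem.Dict.get?_mk_cons] at h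
  split_ifs at h <;> (try simp [PySem.Dict.get?] at h) <;> omega

theorem pvBorStep (a b : Int) (ha : 0 ≤ a) (hb : 0 ≤ b) (h4 : b < 4) :
    PySem.Int.bor (a <<< (2 : Nat)) b = 4 * a + b := by
  have hs : a <<< (2 : Nat) = 4 * a := by rw [Int.shiftLeft_eq]; ring
  rw [hs, PySem.Int.bor_of_nonneg (by positivity) hb]
  have hb4 : b.toNat < 2 ^ 2 := by omega
  have h2 := Nat.two_pow_add_eq_or_of_lt hb4 a.toNat
  have h1 : (4 * a).toNat = 2 ^ 2 * a.toNat := by omega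
  rw [h1, ← h2]
  omega

-- A's loop computes the Horner value of the digit list (when all bases are recognised)
theorem pvLoopA_eq (cs : List Char) (val : Int) (hval : 0 ≤ val) :
    pvEncLoopA cs val = (pvDigits? cs).map (pvHorner val) := by
  induction cs generalizing val with
  | nil => simp [pvEncLoopA, pvDigits?, pvHorner]
  | cons c cs ih =>
    simp only [pvEncLoopA, pvDigits?]
    cases hg : pvBASE_ENCODE.get? c with
    | none => simp
    | some b =>
      obtain ⟨hb0, hb4⟩ := pvBASE_range c b hg
      dsimp only
      rw [pvBorStep val b hval hb0 hb4, ih (4 * val + b) (by omega)]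
      cases pvDigits? cs <;> simp [pvHorner]

-- filterMap vs pvDigits?: recognised prefix agreement
theorem pvFilterMap_of_digits (cs : List Char) (ds : List Int) (h : pvDigits? cs = some ds) :
    cs.filterMap (fun ch => pvBASE_ENCODE.get? ch) = ds := by
  induction cs generalizing ds with
  | nil => simp [pvDigits?] at h; subst h; simp
  | cons c cs ih =>
    simp only [pvDigits?] at h
    cases hg : pvBASE_ENCODE.get? c with
    | none => simp [hg] at h
    | some b =>
      rw [hg] at h
      cases hd : pvDigits? cs with
      | none => simp [hd] at h
      | some ds' =>
        rw [hd] at h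
        simp only [Option.map_some, Option.some.injEq] at h
        subst h
        simp [hg, ih ds' hd]

theorem pvFilterMap_short (cs : List Char) (h : pvDigits? cs = none) :
    (cs.filterMap (fun ch => pvBASE_ENCODE.get? ch)).length < cs.length := by
  induction cs with
  | nil => simp [pvDigits?] at h
  | cons c cs ih =>
    simp only [pvDigits?] at h
    cases hg : pvBASE_ENCODE.get? c with
    | none =>
      simp only [List.filterMap_cons, hg, List.length_cons]
      have := List.length_filterMap_le (fun ch => pvBASE_ENCODE.get? ch) cs
      omega
    | some b =>
      rw [hg] at h
      cases hd : pvDigits? cs with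
      | none =>
        simp only [List.filterMap_cons, hg, List.length_cons]
        have := ih hd
        omega
      | some ds' => simp [hd] at h

-- the positional base-4 sum of B equals the Horner value
theorem pvSum_eq_horner (ds : List Int) (k : Nat) (s : Nat) (acc : Int)
    (hk : s + ds.length = k) :
    (PySem.List.enumerate ds (s : Int)).foldl
      (fun acc p => acc + p.2 * 4 ^ (k - 1 - p.1.toNat)) acc
    = acc + pvHorner 0 ds := by
  induction ds generalizing s acc with
  | nil => simp [PySem.List.enumerate_nil, pvHorner]
  | cons d ds ih =>
    rw [PySem.List.enumerate_cons]
    simp only [List.foldl_cons]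
    have hk' : s + ds.length + 1 = k := by simp at hk; omega
    have hs1 : ((s : Int) + 1) = ((s + 1 : Nat) : Int) := by push_cast; ring
    rw [hs1, ih (s + 1) (acc + d * 4 ^ (k - 1 - ((s : Int)).toNat)) (by omega)]
    have hexp : k - 1 - ((s : Int)).toNat = ds.length := by
      simp only [Int.toNat_natCast]
      omega
    rw [hexp]
    have hh : pvHorner 0 (d :: ds) = d * 4 ^ ds.length + pvHorner 0 ds := by
      have key : ∀ (es : List Int) (a : Int),
          pvHorner a es = a * 4 ^ es.length + pvHorner 0 es := by
        intro es
        induction es with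
        | nil => intro a; simp [pvHorner]
        | cons e es ih2 =>
          intro a
          simp only [pvHorner, List.foldl_cons, List.length_cons] at *
          rw [ih2 (4 * a + e), ih2 (4 * 0 + e)]
          ring
      have h0 : pvHorner 0 (d :: ds) = pvHorner (4 * 0 + d) ds := by
        simp [pvHorner]
      rw [h0, key ds (4 * 0 + d)]
      ring
    rw [hh]
    ring

-- pvDigits? success preserves length
theorem pvDigits_length (cs : List Char) (ds : List Int) (h : pvDigits? cs = some ds) :
    ds.length = cs.length := by
  induction cs generalizing ds with
  | nil => simp [pvDigits?] at h; subst h; simp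
  | cons c cs ih =>
    simp only [pvDigits?] at h
    cases hg : pvBASE_ENCODE.get? c with
    | none => simp [hg] at h
    | some b =>
      rw [hg] at h
      cases hd : pvDigits? cs with
      | none => simp [hd] at h
      | some ds' =>
        rw [hd] at h
        simp only [Option.map_some, Option.some.injEq] at h
        subst h
        simp [ih ds' hd]

-- ===== VERDICT (by name: the statement is the Claim_ definition above) =====
theorem encode_kmer_py_spec : Claim_equal_encode_kmer_py := by
  intro seq _
  unfold Spec_encode_kmer_py encode_kmer_py encode_kmer_py_alt
  rw [pvLoopA_eq seq.toList 0 le_rfl]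
  cases hd : pvDigits? seq.toList with
  | none =>
    have hlt := pvFilterMap_short seq.toList hd
    simp only [Option.map_none]
    rw [if_pos (by omega)]
  | some ds =>
    have hfm := pvFilterMap_of_digits seq.toList ds hd
    have hlen := pvDigits_length seq.toList ds hd
    simp only [Option.map_some, hfm, hlen]
    rw [if_neg (by omega)]
    have hsum := pvSum_eq_horner ds seq.toList.length 0 0 (by omega)
    simp only [Nat.cast_zero, zero_add] at hsum
    rw [hsum]
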